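-- pv_equiv track=rewrite | github.com/gaizzzzi/Learning-and-Coding-Everyday | main/1487_Making_File_Names_Unique.py | getFolderNames
-- ===== SOURCE A (Python) =====
-- from typing import List
--
-- def getFolderNames(names: List[str]) -> List[str]:
--     n_map = {}
--     ans = []
--     for name in names:
--         tmp = 0
--         if name in n_map:
--             tmp = n_map[name]
--             while name + "(" + str(tmp) + ")" in n_map:
--                 tmp += 1
--
--         n_map[name] = tmp + 1
--         if tmp:
--             ans.append(name + "(" + str(tmp) + ")")
--             n_map[name + "(" + str(tmp) + ")"] = 1
--         else:
--             ans.append(name)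
--     return ans
-- ===== SOURCE B (Python) =====
-- from typing import List
--
-- def getFolderNames(names: List[str]) -> List[str]:
--     used = set()
--     ans = []
--     for name in names:
--         if name not in used:
--             ans.append(name)
--             used.add(name)
--         else:
--             k = 1
--             while name + "(" + str(k) + ")" in used:
--                 k += 1
--             pick = name + "(" + str(k) + ")"
--             ans.append(pick)
--             used.add(pick)
--     return ans
-- ===== Notes on version B (the rewrite author's own statement) =====
-- stated objective: simpler
-- what changed: B drops A's per-name resumed-counter dictionary and keeps only a set of emitted names, rescanning suffixes from k=1 on every duplicate; both pick the smallest free suffix, so outputs coincide.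
import Mathlib
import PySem

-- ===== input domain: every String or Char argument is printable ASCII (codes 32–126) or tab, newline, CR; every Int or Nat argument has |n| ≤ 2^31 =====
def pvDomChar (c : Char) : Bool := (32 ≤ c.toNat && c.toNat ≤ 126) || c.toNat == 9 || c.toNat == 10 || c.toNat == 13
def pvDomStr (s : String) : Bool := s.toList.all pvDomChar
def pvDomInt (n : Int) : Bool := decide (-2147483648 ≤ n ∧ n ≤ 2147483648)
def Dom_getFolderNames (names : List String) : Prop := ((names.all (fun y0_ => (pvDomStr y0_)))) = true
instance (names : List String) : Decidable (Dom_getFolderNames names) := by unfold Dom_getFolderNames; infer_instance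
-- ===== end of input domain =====

-- B replaces A's dictionary of resumed per-name counters by a bare set of emitted
-- names with a fresh scan from suffix 1 on every duplicate (objective: simpler).

-- name + "(" + str(t) + ")" — spelled identically in both Pythons
def pvSfx (name : String) (t : Int) : String :=
  name ++ "(" ++ PySem.Int.toStr t ++ ")"

-- ===== PORT A =====
-- while name+"("+str(tmp)+")" in n_map: tmp += 1   (fuel |n_map|+1 only makes the loop total)
def pvFindA (d : PySem.Dict String Int) (name : String) (t : Int) : Nat → Int
  | 0 => t
  | fuel+1 => if d.contains (pvSfx name t) then pvFindA d name (t+1) fuel else t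

def pvGoA : List String → PySem.Dict String Int → List String → List String
  | [], _, ans => ans
  | name :: rest, d, ans =>
      let tmp : Int :=
        match d.get? name with
        | some c => pvFindA d name c (d.items.length + 1)
        | none => 0
      let d1 := d.insert name (tmp + 1)
      if tmp ≠ 0 then
        pvGoA rest (d1.insert (pvSfx name tmp) 1) (ans ++ [pvSfx name tmp])
      else
        pvGoA rest d1 (ans ++ [name])

def getFolderNames (names : List String) : List String :=
  pvGoA names PySem.Dict.empty []

-- ===== PORT B =====
-- while name+"("+str(k)+")" in used: k += 1   (fuel |used|+1 only makes the loop total)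
def pvFindB (used : PySem.Set String) (name : String) (k : Int) : Nat → Int
  | 0 => k
  | fuel+1 => if PySem.Set.contains used (pvSfx name k) then pvFindB used name (k+1) fuel else k

def pvGoB : List String → PySem.Set String → List String → List String
  | [], _, ans => ans
  | name :: rest, used, ans =>
      if PySem.Set.contains used name then
        let pick := pvSfx name (pvFindB used name 1 (used.length + 1))
        pvGoB rest (PySem.Set.add used pick) (ans ++ [pick])
      else
        pvGoB rest (PySem.Set.add used name) (ans ++ [name])

def getFolderNames_alt (names : List String) : List String :=
  pvGoB names PySem.Set.empty []

-- ===== PRECONDITION & SPEC =====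
def Spec_getFolderNames (names : List String) (out : List String) : Prop := out = getFolderNames_alt names
instance (names : List String) (out : List String) : Decidable (Spec_getFolderNames names out) := by unfold Spec_getFolderNames; infer_instance

-- ===== CLAIM (what is proved, stated in full; the proofs are below) =====
def Claim_equal_getFolderNames : Prop := ∀ (names : List String), Dom_getFolderNames names → Spec_getFolderNames names (getFolderNames names)

-- ===== LEMMAS AND PROOFS =====

-- the common shape of both suffix-scanning loops
def pvScan (m : Int → Bool) (t : Int) : Nat → Int
  | 0 => t
  | fuel+1 => if m t then pvScan m (t+1) fuel else t

lemma pvFindA_eq_scan (d : PySem.Dict String Int) (name : String) :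
    ∀ (fuel : Nat) (t : Int), pvFindA d name t fuel = pvScan (fun j => d.contains (pvSfx name j)) t fuel := by
  intro fuel
  induction fuel with
  | zero => intro t; rfl
  | succ f ih => intro t; simp only [pvFindA, pvScan, ih]

lemma pvFindB_eq_scan (used : PySem.Set String) (name : String) :
    ∀ (fuel : Nat) (t : Int), pvFindB used name t fuel = pvScan (fun j => PySem.Set.contains used (pvSfx name j)) t fuel := by
  intro fuel
  induction fuel with
  | zero => intro t; rfl
  | succ f ih => intro t; simp only [pvFindB, pvScan, ih]

lemma pvScan_spec (m : Int → Bool) :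
    ∀ (fuel : Nat) (t : Int), (∃ j : Int, t ≤ j ∧ j < t + fuel ∧ m j = false) →
      t ≤ pvScan m t fuel ∧ m (pvScan m t fuel) = false ∧
        ∀ j : Int, t ≤ j → j < pvScan m t fuel → m j = true := by
  intro fuel
  induction fuel with
  | zero =>
      intro t ⟨j, h1, h2, _⟩
      exfalso; push_cast at h2; omega
  | succ f ih =>
      intro t ⟨j, h1, h2, h3⟩
      by_cases hm : m t
      · have hjt : t + 1 ≤ j := by
          rcases eq_or_lt_of_le h1 with rfl | h
          · rw [hm] at h3; cases h3
          · omega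
        have := ih (t+1) ⟨j, hjt, by push_cast at h2 ⊢; omega, h3⟩
        simp only [pvScan, hm, if_true]
        refine ⟨by omega, this.2.1, ?_⟩
        intro k hk1 hk2
        rcases eq_or_lt_of_le hk1 with rfl | h
        · exact hm
        · exact this.2.2 k (by omega) hk2
      · simp only [pvScan, hm]
        exact ⟨le_refl t, by simpa using hm, fun k hk1 hk2 => absurd (lt_of_le_of_lt hk1 hk2) (lt_irrefl t)⟩

-- injectivity of str(t) for t ≥ 0
lemma pvDigitChar_inj : ∀ a < 10, ∀ b < 10, Nat.digitChar a = Nat.digitChar b → a = b := by decide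

lemma pvMapDigitChar_inj :
    ∀ (l1 l2 : List Nat), (∀ x ∈ l1, x < 10) → (∀ x ∈ l2, x < 10) →
      l1.map Nat.digitChar = l2.map Nat.digitChar → l1 = l2 := by
  intro l1
  induction l1 with
  | nil => intro l2 _ _ h; cases l2 <;> simp_all
  | cons a t ih =>
      intro l2 h1 h2 h
      cases l2 with
      | nil => simp_all
      | cons b t2 =>
          simp only [List.map_cons, List.cons.injEq] at h
          have : a = b := pvDigitChar_inj a (h1 a (by simp)) b (h2 b (by simp)) h.1
          subst this
          simp only [List.cons.injEq, true_and]
          exact ih t2 (fun x hx => h1 x (by simp [hx])) (fun x hx => h2 x (by simp [hx])) h.2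

lemma pvToDigitsCore_eq :
    ∀ (n : Nat), 0 < n → ∀ (fuel : Nat) (ds : List Char), n ≤ fuel →
      Nat.toDigitsCore 10 fuel n ds = ((Nat.digits 10 n).map Nat.digitChar).reverse ++ ds := by
  intro n
  induction n using Nat.strong_induction_on with
  | _ n ih =>
      intro hn fuel ds hfuel
      cases fuel with
      | zero => omega
      | succ f =>
          rw [Nat.toDigitsCore]
          rw [Nat.digits_def' (by norm_num : 1 < 10) hn]
          by_cases h10 : n / 10 = 0
          · have hd : Nat.digits 10 (n / 10) = [] := by rw [h10]; simp
            simp [h10]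
          · simp only [h10, if_false]
            have hlt : n / 10 < n := Nat.div_lt_self hn (by norm_num)
            rw [ih (n / 10) hlt (Nat.pos_of_ne_zero h10) f (Nat.digitChar (n % 10) :: ds) (by omega)]
            simp

lemma pvToDigits_eq (n : Nat) (h : 0 < n) :
    Nat.toDigits 10 n = ((Nat.digits 10 n).map Nat.digitChar).reverse := by
  rw [Nat.toDigits, pvToDigitsCore_eq n h (n+1) [] (by omega)]
  simp

lemma pvToDigits_inj : ∀ m n : Nat, Nat.toDigits 10 m = Nat.toDigits 10 n → m = n := by
  have key : ∀ n : Nat, 0 < n → Nat.toDigits 10 n ≠ ['0'] := by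
    intro n hn h
    rw [pvToDigits_eq n hn] at h
    have hrev : (Nat.digits 10 n).map Nat.digitChar = ['0'] := by
      have := congrArg List.reverse h
      simpa using this
    have hlast := Nat.getLast_digit_ne_zero 10 (m := n) (by omega)
    rcases hd : Nat.digits 10 n with _ | ⟨d, t⟩
    · exact (Nat.digits_ne_nil_iff_ne_zero.mpr (by omega)) hd
    · rw [hd] at hrev
      cases t with
      | nil =>
          simp only [List.map_cons, List.map_nil, List.cons.injEq] at hrev
          have hdlt : d < 10 := Nat.digits_lt_base (by norm_num) (by rw [hd]; simp)
          have : d = 0 := pvDigitChar_inj d hdlt 0 (by norm_num) (by simpa using hrev.1)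
          subst this
          simp [hd] at hlast
      | cons e t2 => simp at hrev
  intro m n h
  rcases Nat.eq_zero_or_pos m with rfl | hm
  · rcases Nat.eq_zero_or_pos n with rfl | hn
    · rfl
    · exact absurd h.symm (key n hn)
  · rcases Nat.eq_zero_or_pos n with rfl | hn
    · exact absurd h (key m hm)
    · rw [pvToDigits_eq m hm, pvToDigits_eq n hn] at h
      have h2 := List.reverse_injective h
      have h3 := pvMapDigitChar_inj _ _
        (fun x hx => Nat.digits_lt_base (by norm_num) hx)
        (fun x hx => Nat.digits_lt_base (by norm_num) hx) h2
      exact Nat.digits_inj_iff.mp h3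

lemma pvToStr_inj {i j : Int} (hi : 0 ≤ i) (hj : 0 ≤ j) :
    PySem.Int.toStr i = PySem.Int.toStr j → i = j := by
  intro h
  have h2 : PySem.Int.toChars i = PySem.Int.toChars j := by
    have := congrArg String.toList h
    simpa [PySem.Int.toList_toStr] using this
  unfold PySem.Int.toChars at h2
  rw [if_neg (by omega), if_neg (by omega)] at h2
  have := pvToDigits_inj i.toNat j.toNat h2
  omega

lemma pvSfx_inj {s : String} {i j : Int} (hi : 0 ≤ i) (hj : 0 ≤ j) :
    pvSfx s i = pvSfx s j → i = j := by
  intro h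
  apply pvToStr_inj hi hj
  apply String.toList_inj.mp
  have h2 := congrArg String.toList h
  simp only [pvSfx, String.toList_append] at h2
  simp only [List.append_assoc] at h2
  have h3 := List.append_cancel_left h2
  have h4 := List.append_cancel_left h3
  exact List.append_cancel_right h4

-- pigeonhole: some suffix in a window of |L|+1 candidates misses the finite list L
lemma pvExists_free (L : List String) (name : String) (t : Int) (ht : 0 ≤ t) :
    ∃ j : Int, t ≤ j ∧ j < t + ((L.length : Int) + 1) ∧ pvSfx name j ∉ L := by
  by_contra hcon
  push_neg at hcon
  have hinj : Set.InjOn (pvSfx name) ((Finset.Ico t (t + ((L.length : Int) + 1))) : Finset Int) := by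
    intro a ha b hb hab
    simp only [Finset.coe_Ico, Set.mem_Ico] at ha hb
    exact pvSfx_inj (by omega) (by omega) hab
  have hsub : (Finset.Ico t (t + ((L.length : Int) + 1))).image (pvSfx name) ⊆ L.toFinset := by
    intro x hx
    simp only [Finset.mem_image, Finset.mem_Ico] at hx
    obtain ⟨j, ⟨h1, h2⟩, rfl⟩ := hx
    exact List.mem_toFinset.mpr (hcon j h1 h2)
  have hcard1 : (Finset.Ico t (t + ((L.length : Int) + 1))).card = L.length + 1 := by
    rw [Int.card_Ico]; omega
  have hcard2 := Finset.card_le_card hsub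
  rw [Finset.card_image_of_injOn hinj, hcard1] at hcard2
  have := List.toFinset_card_le L
  omega

-- the simulation invariant between A's dict and B's set
def pvInv (d : PySem.Dict String Int) (used : PySem.Set String) : Prop :=
  d.keys.Nodup ∧ used.Nodup ∧
  (∀ s, d.contains s = true ↔ s ∈ used) ∧
  (∀ s c, d.get? s = some c → 1 ≤ c ∧ ∀ j : Int, 1 ≤ j → j < c → d.contains (pvSfx s j) = true)

lemma pvContains_mono (d : PySem.Dict String Int) (k s : String) (v : Int)
    (h : d.contains s = true) : (d.insert k v).contains s = true := by
  rw [PySem.Dict.contains_insert, h, Bool.or_true]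

lemma pvGo_eq : ∀ (names : List String) (d : PySem.Dict String Int) (used : PySem.Set String)
    (ans : List String), pvInv d used → pvGoA names d ans = pvGoB names used ans := by
  intro names
  induction names with
  | nil => intro d used ans _; rfl
  | cons name rest ih =>
      intro d used ans hInv
      obtain ⟨hkeys, hused, hmem, hctr⟩ := hInv
      have hcontains_eq : ∀ s, d.contains s = PySem.Set.contains used s := by
        intro s
        rw [Bool.eq_iff_iff, hmem s, PySem.Set.contains_iff]
      by_cases hc : d.contains name = true
      · -- duplicate: both scan for the least free suffix
        obtain ⟨c, hget⟩ : ∃ c, d.get? name = some c := by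
          rw [PySem.Dict.contains_eq_isSome_get?] at hc
          exact Option.isSome_iff_exists.mp hc
        obtain ⟨hc1, hcall⟩ := hctr name c hget
        have hkeyslen : d.keys.length = d.items.length := by
          simp [PySem.Dict.keys]
        -- A's scan
        obtain ⟨j, hj1, hj2, hj3⟩ := pvExists_free d.keys name c (by omega)
        have hjA : d.contains (pvSfx name j) = false := by
          rw [PySem.Dict.contains_eq_decide_mem_keys]
          simpa using hj3
        have hspecA := pvScan_spec (fun j => d.contains (pvSfx name j)) (d.items.length + 1) c
          ⟨j, hj1, by push_cast at hj2 ⊢; omega, hjA⟩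
        set t := pvScan (fun j => d.contains (pvSfx name j)) c (d.items.length + 1) with ht
        have hA_free : d.contains (pvSfx name t) = false := hspecA.2.1
        have hA_below : ∀ j : Int, c ≤ j → j < t → d.contains (pvSfx name j) = true := hspecA.2.2
        have ht1 : 1 ≤ t := le_trans hc1 hspecA.1
        have hbelow : ∀ j : Int, 1 ≤ j → j < t → d.contains (pvSfx name j) = true := by
          intro j h1 h2
          by_cases hjc : j < c
          · exact hcall j h1 hjc
          · exact hA_below j (by omega) h2
        -- B's scan
        obtain ⟨j', hj1', hj2', hj3'⟩ := pvExists_free used name 1 (by norm_num)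
        have hjB : PySem.Set.contains used (pvSfx name j') = false := by
          rw [← hcontains_eq, ← Bool.not_eq_true, PySem.Dict.contains_eq_decide_mem_keys]
          simp only [decide_eq_true_eq]
          intro hmem2
          exact hj3' ((hmem _).mp (by rw [PySem.Dict.contains_eq_decide_mem_keys]; simpa using hmem2))
        have hspecB := pvScan_spec (fun j => PySem.Set.contains used (pvSfx name j)) (used.length + 1) 1
          ⟨j', hj1', by push_cast at hj2' ⊢; omega, hjB⟩
        set k := pvScan (fun j => PySem.Set.contains used (pvSfx name j)) 1 (used.length + 1) with hk
        have hB1 : 1 ≤ k := hspecB.1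
        have hB_free : PySem.Set.contains used (pvSfx name k) = false := hspecB.2.1
        have hB_below : ∀ j : Int, 1 ≤ j → j < k → PySem.Set.contains used (pvSfx name j) = true := hspecB.2.2
        have htk : t = k := by
          have h1 : t ≤ k := by
            by_contra hlt
            have h0 := hbelow k hB1 (by omega)
            rw [hcontains_eq, hB_free] at h0
            cases h0
          have h2 : k ≤ t := by
            by_contra hlt
            have h0 := hB_below t ht1 (by omega)
            rw [← hcontains_eq, hA_free] at h0
            cases h0
          omega
        have hcB : PySem.Set.contains used name = true := by rw [← hcontains_eq]; exact hc
        -- unfold one step of both programs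
        simp only [pvGoA, pvGoB, hget, hcB, if_true, pvFindA_eq_scan, pvFindB_eq_scan, ← ht, ← hk, ← htk,
          if_pos (show t ≠ 0 by omega)]
        -- recurse with the preserved invariant
        apply ih
        refine ⟨PySem.Dict.nodup_keys_insert _ _ _ (PySem.Dict.nodup_keys_insert _ _ _ hkeys),
          PySem.Set.nodup_add _ _ hused, ?_, ?_⟩
        · intro s
          rw [PySem.Dict.contains_insert, PySem.Dict.contains_insert, PySem.Set.mem_add]
          simp only [Bool.or_eq_true, beq_iff_eq]
          constructor
          · rintro (h | h | h)
            · right; exact h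
            · left; rw [h]; exact (hmem name).mp hc
            · left; exact (hmem s).mp h
          · rintro (h | h)
            · right; right; exact (hmem s).mpr h
            · left; exact h
        · intro s cc hgets
          rw [PySem.Dict.get?_insert, PySem.Dict.get?_insert] at hgets
          by_cases hs0 : s = pvSfx name t
          · rw [if_pos hs0] at hgets
            injection hgets with hcc
            exact ⟨by omega, fun j hj1 hj2 => by omega⟩
          · rw [if_neg hs0] at hgets
            by_cases hsn : s = name
            · rw [if_pos hsn] at hgets
              injection hgets with hcc
              subst hsn
              refine ⟨by omega, ?_⟩
              intro j hj1 hj2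
              by_cases hjt : j = t
              · subst hjt
                exact PySem.Dict.contains_insert_self _ _ _
              · exact pvContains_mono _ _ _ _ (pvContains_mono _ _ _ _ (hbelow j hj1 (by omega)))
            · rw [if_neg hsn] at hgets
              obtain ⟨h1, h2⟩ := hctr s cc hgets
              exact ⟨h1, fun j hj1 hj2 => pvContains_mono _ _ _ _ (pvContains_mono _ _ _ _ (h2 j hj1 hj2))⟩
      · -- fresh name: both emit it unchanged
        have hcf : d.contains name = false := by simpa using hc
        have hget : d.get? name = none := by
          rw [PySem.Dict.contains_eq_isSome_get?] at hcf
          cases h : d.get? name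
          · rfl
          · rw [h] at hcf; cases hcf
        have hcB : PySem.Set.contains used name = false := by rw [← hcontains_eq]; exact hcf
        simp only [pvGoA, pvGoB, hget, hcB, Bool.false_eq_true, if_false, ne_eq,
          not_true_eq_false]
        apply ih
        refine ⟨PySem.Dict.nodup_keys_insert _ _ _ hkeys, PySem.Set.nodup_add _ _ hused, ?_, ?_⟩
        · intro s
          rw [PySem.Dict.contains_insert, PySem.Set.mem_add]
          simp only [Bool.or_eq_true, beq_iff_eq]
          constructor
          · rintro (h | h)
            · right; exact h
            · left; exact (hmem s).mp h
          · rintro (h | h)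
            · right; exact (hmem s).mpr h
            · left; exact h
        · intro s cc hgets
          rw [PySem.Dict.get?_insert] at hgets
          by_cases hsn : s = name
          · rw [if_pos hsn] at hgets
            injection hgets with hcc
            exact ⟨by omega, fun j hj1 hj2 => by omega⟩
          · rw [if_neg hsn] at hgets
            obtain ⟨h1, h2⟩ := hctr s cc hgets
            exact ⟨h1, fun j hj1 hj2 => pvContains_mono _ _ _ _ (h2 j hj1 hj2)⟩

-- ===== VERDICT =====
theorem getFolderNames_spec : Claim_equal_getFolderNames := by
  unfold Claim_equal_getFolderNames Spec_getFolderNames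
  intro names _
  unfold getFolderNames getFolderNames_alt
  apply pvGo_eq
  refine ⟨by simp, List.nodup_nil, ?_, ?_⟩
  · intro s
    simp [PySem.Dict.contains_empty, PySem.Set.empty]
  · intro s c h
    rw [PySem.Dict.get?_empty] at h
    cases h
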